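-- pv_equiv track=rewrite | github.com/Sakura-0407/VMCAI_Synthesis-of-Minimal-DRTA | docker/RTA/test_encoding.py | split_region_around_points
-- ===== SOURCE A (Python) =====
-- def split_region_around_points(region, conflict_points):
--     """
--     Split interval around conflict points to avoid these points
--
--     Args:
--     region: Interval to split (lower, upper, lower_closed, upper_closed)
--     conflict_points: List of points to avoid
--
--     Returns:
--     List of split intervals
--     """
--     lower, upper, lower_closed, upper_closed = region
--
--     if not conflict_points:
--         return [region]
--
--     # Only handle conflict points within interval
--     internal_points = []
--     for point in conflict_points:
--         if lower < point < upper: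
--             internal_points.append(point)
--         elif point == lower and lower_closed:
--             # Point on left boundary, need to exclude
--             lower_closed = False
--         elif point == upper and upper_closed:
--             # Point on right boundary, need to exclude
--             upper_closed = False
--
--     if not internal_points:
--         # Only boundary point conflicts, return adjusted interval
--         if lower < upper or (lower == upper and lower_closed and upper_closed):
--             return [(lower, upper, lower_closed, upper_closed)]
--         else:
--             return []  # Interval becomes empty set
--
--     # Sort points by value
--     internal_points.sort()
--
--     # Split interval
--     result = []
--     current_lower = lower
--     current_lower_closed = lower_closed
--
--     for point in internal_points:
--         # Add interval to the left of point
--         if current_lower < point or (current_lower == point and current_lower_closed):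
--             result.append((current_lower, point, current_lower_closed, False))
--
--         # Prepare to handle interval to the right of point
--         current_lower = point
--         current_lower_closed = False
--
--     # Add last interval
--     if current_lower < upper or (current_lower == upper and current_lower_closed and upper_closed):
--         result.append((current_lower, upper, current_lower_closed, upper_closed))
--
--     # Filter out empty intervals
--     return [r for r in result if r[0] < r[1] or (r[0] == r[1] and r[2] and r[3])]
-- ===== SOURCE B (Python) =====
-- def split_region_around_points(region, conflict_points):
--     lower, upper, lower_closed, upper_closed = region
--     if not conflict_points:
--         return [region]
--     # boundary conflicts open the corresponding endpoint
--     lower_closed = lower_closed and lower not in conflict_points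
--     upper_closed = upper_closed and upper not in conflict_points
--     if not any(lower < p < upper for p in conflict_points):
--         if lower < upper or (lower == upper and lower_closed and upper_closed):
--             return [(lower, upper, lower_closed, upper_closed)]
--         return []
--     return _carve(lower, upper, lower_closed, upper_closed, conflict_points)
--
-- def _carve(lower, upper, lower_closed, upper_closed, points):
--     # divide and conquer: cut at the first interior point, recurse on both halves
--     internal = [p for p in points if lower < p < upper]
--     if not internal:
--         return [(lower, upper, lower_closed, upper_closed)] if lower < upper else []
--     pivot, rest = internal[0], internal[1:]
--     return (_carve(lower, pivot, lower_closed, False, rest)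
--             + _carve(pivot, upper, False, upper_closed, rest))
-- ===== Notes on version B (the rewrite author's own statement) =====
-- stated objective: alternative
-- what changed: Replaces A's sort-then-linear-scan split (sorting the interior points and threading current_lower/current_lower_closed through a loop, then filtering empties) with an unsorted divide-and-conquer: cut the interval at the first interior point and recurse on both halves with the remaining points, quicksort-style; boundary closedness is adjusted by membership tests instead of A's state-toggling loop.
import Mathlib
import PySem

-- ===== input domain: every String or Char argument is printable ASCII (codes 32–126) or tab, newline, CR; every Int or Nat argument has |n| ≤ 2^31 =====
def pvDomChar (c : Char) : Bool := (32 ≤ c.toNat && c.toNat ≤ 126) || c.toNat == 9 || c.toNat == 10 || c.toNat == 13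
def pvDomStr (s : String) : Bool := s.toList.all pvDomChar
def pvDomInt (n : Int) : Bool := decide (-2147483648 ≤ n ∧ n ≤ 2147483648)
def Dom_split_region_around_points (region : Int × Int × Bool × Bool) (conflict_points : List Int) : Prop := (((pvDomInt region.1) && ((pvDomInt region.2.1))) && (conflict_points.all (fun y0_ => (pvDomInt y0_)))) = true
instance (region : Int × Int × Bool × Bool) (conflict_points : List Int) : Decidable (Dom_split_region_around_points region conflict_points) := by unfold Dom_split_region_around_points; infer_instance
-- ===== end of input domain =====

-- B replaces A's sort-then-scan split by an unsorted quicksort-style divide-and-conquer around the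
-- first interior point (objective: alternative decomposition, same result). Return-value equivalence
-- only (A sorts only a local list; neither argument is mutated observably).

-- ===== PORT A =====
-- A's first for-loop: state (internal_points, lower_closed, upper_closed)
def pvBoundaryStep (lower upper : Int) (st : List Int × Bool × Bool) (p : Int) : List Int × Bool × Bool :=
  if lower < p ∧ p < upper then (st.1 ++ [p], st.2.1, st.2.2)
  else if p = lower ∧ st.2.1 then (st.1, false, st.2.2)
  else if p = upper ∧ st.2.2 then (st.1, st.2.1, false)
  else st

-- A's final list-comprehension filter
def pvKeep (r : Int × Int × Bool × Bool) : Bool :=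
  decide (r.1 < r.2.1) || (decide (r.1 = r.2.1) && r.2.2.1 && r.2.2.2)

-- A's second for-loop over the sorted internal points, carrying (current_lower, current_lower_closed)
def aSplitLoop (upper : Int) (uc : Bool) : List Int → Int → Bool → List (Int × Int × Bool × Bool)
  | [], cur, curC =>
      if cur < upper ∨ (cur = upper ∧ curC ∧ uc) then [(cur, upper, curC, uc)] else []
  | p :: rest, cur, curC =>
      (if cur < p ∨ (cur = p ∧ curC) then [(cur, p, curC, false)] else []) ++ aSplitLoop upper uc rest p false

def split_region_around_points (region : Int × Int × Bool × Bool) (conflict_points : List Int) : List (Int × Int × Bool × Bool) :=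
  let lower := region.1; let upper := region.2.1
  if conflict_points = [] then [region]
  else
    let st := conflict_points.foldl (pvBoundaryStep lower upper) ([], region.2.2.1, region.2.2.2)
    let internal := st.1; let lc := st.2.1; let uc := st.2.2
    if internal = [] then
      if lower < upper ∨ (lower = upper ∧ lc ∧ uc) then [(lower, upper, lc, uc)] else []
    else
      let ps := PySem.List.sorted internal (fun x => x) false
      (aSplitLoop upper uc ps lower lc).filter pvKeep

-- ===== PORT B =====
-- _carve: cut at the first interior point, recurse on both halves with the remaining points
def bCarve (lower upper : Int) (lc uc : Bool) (points : List Int) : List (Int × Int × Bool × Bool) :=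
  match h : points.filter (fun p => decide (lower < p) && decide (p < upper)) with
  | [] => if lower < upper then [(lower, upper, lc, uc)] else []
  | pivot :: rest => bCarve lower pivot lc false rest ++ bCarve pivot upper false uc rest
termination_by points.length
decreasing_by
  all_goals
    have hle := List.length_filter_le (fun p => decide (lower < p) && decide (p < upper)) points
    rw [h] at hle; simp at hle; omega

def split_region_around_points_alt (region : Int × Int × Bool × Bool) (conflict_points : List Int) : List (Int × Int × Bool × Bool) :=
  let lower := region.1; let upper := region.2.1
  if conflict_points = [] then [region]
  else
    let lc := region.2.2.1 && !(conflict_points.contains lower)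
    let uc := region.2.2.2 && !(conflict_points.contains upper)
    if ¬ conflict_points.any (fun p => decide (lower < p) && decide (p < upper)) then
      if lower < upper ∨ (lower = upper ∧ lc ∧ uc) then [(lower, upper, lc, uc)] else []
    else
      bCarve lower upper lc uc conflict_points

-- ===== PRECONDITION & SPEC =====
def Spec_split_region_around_points (region : Int × Int × Bool × Bool) (conflict_points : List Int) (out : List (Int × Int × Bool × Bool)) : Prop := out = split_region_around_points_alt region conflict_points
instance (region : Int × Int × Bool × Bool) (conflict_points : List Int) (out : List (Int × Int × Bool × Bool)) : Decidable (Spec_split_region_around_points region conflict_points out) := by unfold Spec_split_region_around_points; infer_instance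

-- ===== CLAIM (what is proved, stated in full; the proofs are below) =====
def Claim_equal_split_region_around_points : Prop := ∀ (region : Int × Int × Bool × Bool) (conflict_points : List Int), Dom_split_region_around_points region conflict_points → Spec_split_region_around_points region conflict_points (split_region_around_points region conflict_points)

-- ===== LEMMAS AND PROOFS =====

-- canonical pieces of (l,u] split at a strictly increasing list of interior cut points
def chain (u : Int) (uc : Bool) : Int → Bool → List Int → List (Int × Int × Bool × Bool)
  | l, lc, [] => [(l, u, lc, uc)]
  | l, lc, d :: ds => (l, d, lc, false) :: chain u uc d false ds

-- adjacent-duplicate removal with a seed (drops elements equal to the running previous value)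
def dAdj : Int → List Int → List Int
  | _, [] => []
  | c, p :: r => if p = c then dAdj c r else p :: dAdj p r

-- sorted distinct values
def nsort (xs : List Int) : List Int :=
  match PySem.List.sorted xs (fun x => x) false with
  | [] => []
  | a :: r => a :: dAdj a r


-- dAdj over a ≤-sorted list with seed below all elements: membership and strict order
theorem dAdj_mem : ∀ (ps : List Int) (c : Int), ps.Pairwise (· ≤ ·) → (∀ p ∈ ps, c ≤ p) →
    ∀ x, x ∈ dAdj c ps ↔ (x ∈ ps ∧ x ≠ c) := by
  intro ps
  induction ps with
  | nil => intro c _ _ x; simp [dAdj]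
  | cons p r ih =>
    intro c hpw hge x
    have hpw' : r.Pairwise (· ≤ ·) := (List.pairwise_cons.mp hpw).2
    have hpr : ∀ q ∈ r, p ≤ q := (List.pairwise_cons.mp hpw).1
    by_cases hpc : p = c
    · rw [show dAdj c (p :: r) = dAdj c r from by simp [dAdj, hpc]]
      rw [ih c hpw' (fun q hq => hpc ▸ hpr q hq) x]
      simp only [List.mem_cons]
      constructor
      · rintro ⟨hr, hne⟩; exact ⟨Or.inr hr, hne⟩
      · rintro ⟨h1 | h1, hne⟩
        · exact absurd (h1.trans hpc) hne
        · exact ⟨h1, hne⟩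
    · have hclt : c < p := lt_of_le_of_ne (hge p (List.mem_cons_self ..)) (fun h => hpc h.symm)
      rw [show dAdj c (p :: r) = p :: dAdj p r from by simp [dAdj, hpc]]
      simp only [List.mem_cons, ih p hpw' hpr x]
      constructor
      · rintro (h1 | ⟨h1, h2⟩)
        · exact ⟨Or.inl h1, by omega⟩
        · have := hpr x h1; exact ⟨Or.inr h1, by omega⟩
      · rintro ⟨h1 | h1, hne⟩
        · exact Or.inl h1
        · by_cases hxp : x = p
          · exact Or.inl hxp
          · exact Or.inr ⟨h1, hxp⟩

theorem dAdj_sorted : ∀ (ps : List Int) (c : Int), ps.Pairwise (· ≤ ·) → (∀ p ∈ ps, c ≤ p) →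
    (dAdj c ps).Pairwise (· < ·) ∧ (∀ x ∈ dAdj c ps, c < x) := by
  intro ps
  induction ps with
  | nil => intro c _ _; simp [dAdj]
  | cons p r ih =>
    intro c hpw hge
    have hpw' : r.Pairwise (· ≤ ·) := (List.pairwise_cons.mp hpw).2
    have hpr : ∀ q ∈ r, p ≤ q := (List.pairwise_cons.mp hpw).1
    by_cases hpc : p = c
    · rw [show dAdj c (p :: r) = dAdj c r from by simp [dAdj, hpc]]
      exact ih c hpw' (fun q hq => hpc ▸ hpr q hq)
    · have hclt : c < p := lt_of_le_of_ne (hge p (List.mem_cons_self ..)) (fun h => hpc h.symm)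
      obtain ⟨hsort, hlt⟩ := ih p hpw' hpr
      rw [show dAdj c (p :: r) = p :: dAdj p r from by simp [dAdj, hpc]]
      refine ⟨List.pairwise_cons.mpr ⟨hlt, hsort⟩, ?_⟩
      intro x hx
      rcases List.mem_cons.mp hx with h | h
      · omega
      · have := hlt x h; omega

theorem sorted_pairwise_le (xs : List Int) :
    (PySem.List.sorted xs (fun x => x) false).Pairwise (· ≤ ·) := by
  have := PySem.List.sorted_pairwise xs (fun x => x)
  simpa using this

theorem mem_nsort (xs : List Int) : ∀ x, x ∈ nsort xs ↔ x ∈ xs := by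
  intro x
  unfold nsort
  cases heq : PySem.List.sorted xs (fun x => x) false with
  | nil =>
    have : xs = [] := by
      have := PySem.List.sorted_eq_nil_iff (xs := xs) (key := fun x => x) (rev := false)
      exact this.mp heq
    simp [this]
  | cons a r =>
    have hpw : (a :: r).Pairwise (· ≤ ·) := heq ▸ sorted_pairwise_le xs
    have hpw' : r.Pairwise (· ≤ ·) := (List.pairwise_cons.mp hpw).2
    have har : ∀ q ∈ r, a ≤ q := (List.pairwise_cons.mp hpw).1
    have hmem : x ∈ xs ↔ x ∈ a :: r := by rw [← heq, PySem.List.mem_sorted]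
    rw [hmem]
    simp only [List.mem_cons, dAdj_mem r a hpw' har x]
    constructor
    · rintro (h | ⟨h, _⟩)
      · exact Or.inl h
      · exact Or.inr h
    · rintro (h | h)
      · exact Or.inl h
      · by_cases hxa : x = a
        · exact Or.inl hxa
        · exact Or.inr ⟨h, hxa⟩

theorem nsort_pairwise (xs : List Int) : (nsort xs).Pairwise (· < ·) := by
  unfold nsort
  cases heq : PySem.List.sorted xs (fun x => x) false with
  | nil => simp
  | cons a r =>
    have hpw : (a :: r).Pairwise (· ≤ ·) := heq ▸ sorted_pairwise_le xs
    obtain ⟨hs, hl⟩ := dAdj_sorted r a (List.pairwise_cons.mp hpw).2 (List.pairwise_cons.mp hpw).1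
    exact List.pairwise_cons.mpr ⟨hl, hs⟩

theorem strictSorted_ext (l1 l2 : List Int) (h1 : l1.Pairwise (· < ·)) (h2 : l2.Pairwise (· < ·))
    (hm : ∀ x, x ∈ l1 ↔ x ∈ l2) : l1 = l2 :=
  List.Perm.eq_of_pairwise (fun _ _ _ _ h h' => absurd h' (lt_asymm h)) h1 h2
    ((List.perm_ext_iff_of_nodup (h1.imp ne_of_lt) (h2.imp ne_of_lt)).mpr hm)

theorem chain_append (u p : Int) (uc : Bool) (B : List Int) :
    ∀ (A : List Int) (l : Int) (lc : Bool),
      chain u uc l lc (A ++ p :: B) = chain p false l lc A ++ chain u uc p false B := by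
  intro A
  induction A with
  | nil => intro l lc; simp [chain]
  | cons a A' ih => intro l lc; simp [chain, ih a false]

-- A's split loop, after the emptiness filter, is the canonical chain over dAdj
theorem A_loop (u : Int) (uc : Bool) :
    ∀ (ps : List Int) (cur : Int) (curC : Bool),
      cur < u → ps.Pairwise (· ≤ ·) → (∀ p ∈ ps, cur ≤ p ∧ p < u) →
      (curC = true → ∀ p ∈ ps, cur < p) →
      (aSplitLoop u uc ps cur curC).filter pvKeep = chain u uc cur curC (dAdj cur ps) := by
  intro ps
  induction ps with
  | nil =>
    intro cur curC hcu _ _ _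
    have hcond : cur < u ∨ (cur = u ∧ curC = true ∧ uc = true) := Or.inl hcu
    have hk : pvKeep (cur, u, curC, uc) = true := by simp [pvKeep]; omega
    simp [aSplitLoop, dAdj, chain, hcond, List.filter, hk]
  | cons p rest ih =>
    intro cur curC hcu hpw hb hs
    have hcp : cur ≤ p := (hb p (List.mem_cons_self ..)).1
    have hpu : p < u := (hb p (List.mem_cons_self ..)).2
    have hpw' : rest.Pairwise (· ≤ ·) := (List.pairwise_cons.mp hpw).2
    have hpr : ∀ q ∈ rest, p ≤ q := (List.pairwise_cons.mp hpw).1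
    have hb' : ∀ q ∈ rest, p ≤ q ∧ q < u :=
      fun q hq => ⟨hpr q hq, (hb q (List.mem_cons_of_mem _ hq)).2⟩
    have ihr := ih p false hpu hpw' hb' (by simp)
    by_cases hEq : p = cur
    · subst hEq
      have hC : curC = false := by
        by_contra h
        have hct : curC = true := by revert h; cases curC <;> simp
        have := hs hct p (List.mem_cons_self ..)
        omega
      subst hC
      rw [show dAdj p (p :: rest) = dAdj p rest from by simp [dAdj]]
      simp only [aSplitLoop, List.filter_append]
      rw [show (if p < p ∨ True ∧ (false : Bool) = true then
          [(p, p, (false : Bool), (false : Bool))] else ([] : List (Int × Int × Bool × Bool))) = []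
        from by simp]
      simpa using ihr
    · have hlt : cur < p := lt_of_le_of_ne hcp (fun h => hEq h.symm)
      rw [show dAdj cur (p :: rest) = p :: dAdj p rest from by simp [dAdj, hEq]]
      simp only [aSplitLoop, List.filter_append]
      have hcond : cur < p ∨ (cur = p ∧ curC = true) := Or.inl hlt
      rw [if_pos hcond]
      have hk : pvKeep (cur, p, curC, false) = true := by simp [pvKeep]; omega
      rw [show List.filter pvKeep [(cur, p, curC, false)] = [(cur, p, curC, false)] from by
        simp [List.filter, hk]]
      rw [ihr]
      simp [chain]

-- splitting the sorted distinct values at a pivot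
theorem nsort_split (l u p : Int) (rest : List Int)
    (hb : ∀ x ∈ rest, l < x ∧ x < u) (hlp : l < p) (hpu : p < u) :
    nsort (rest.filter (fun x => decide (l < x) && decide (x < p))) ++
      p :: nsort (rest.filter (fun x => decide (p < x) && decide (x < u)))
      = nsort (p :: rest) := by
  have hmemL : ∀ x, x ∈ nsort (rest.filter (fun x => decide (l < x) && decide (x < p))) ↔
      (x ∈ rest ∧ l < x ∧ x < p) := by
    intro x; rw [mem_nsort]; simp [List.mem_filter]
  have hmemR : ∀ x, x ∈ nsort (rest.filter (fun x => decide (p < x) && decide (x < u))) ↔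
      (x ∈ rest ∧ p < x ∧ x < u) := by
    intro x; rw [mem_nsort]; simp [List.mem_filter]
  apply strictSorted_ext
  · apply List.pairwise_append.mpr
    refine ⟨nsort_pairwise _, List.pairwise_cons.mpr ⟨?_, nsort_pairwise _⟩, ?_⟩
    · intro x hx; exact ((hmemR x).mp hx).2.1
    · intro a ha b hb'
      have ha' := (hmemL a).mp ha
      rcases List.mem_cons.mp hb' with h | h
      · omega
      · have := (hmemR b).mp h; omega
  · exact nsort_pairwise _
  · intro x
    rw [mem_nsort]
    simp only [List.mem_append, List.mem_cons, hmemL, hmemR]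
    constructor
    · rintro (⟨h, _⟩ | h | ⟨h, _⟩)
      · exact Or.inr h
      · exact Or.inl h
      · exact Or.inr h
    · rintro (h | h)
      · exact Or.inr (Or.inl h)
      · have := hb x h
        rcases lt_trichotomy x p with hc | hc | hc
        · exact Or.inl ⟨h, this.1, hc⟩
        · exact Or.inr (Or.inl hc)
        · exact Or.inr (Or.inr ⟨h, hc, this.2⟩)

-- B's divide-and-conquer carve equals the canonical chain over the sorted distinct interior points
theorem bCarve_char : ∀ (n : Nat) (pts : List Int) (l u : Int) (lc uc : Bool),
    pts.length ≤ n → l < u →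
    bCarve l u lc uc pts
      = chain u uc l lc (nsort (pts.filter (fun p => decide (l < p) && decide (p < u)))) := by
  intro n
  induction n with
  | zero =>
    intro pts l u lc uc hlen hlu
    have : pts = [] := List.eq_nil_of_length_eq_zero (Nat.le_zero.mp hlen)
    subst this
    rw [bCarve]
    simp [nsort, chain, hlu, PySem.List.sorted]
  | succ n ih =>
    intro pts l u lc uc hlen hlu
    rw [bCarve]
    cases hF : pts.filter (fun p => decide (l < p) && decide (p < u)) with
    | nil =>
      simp only [hF]
      simp [nsort, chain, hlu, PySem.List.sorted]
    | cons pivot rest =>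
      simp only [hF]
      have hpiv : pivot ∈ pts.filter (fun p => decide (l < p) && decide (p < u)) := by
        rw [hF]; exact List.mem_cons_self ..
      have hpb : l < pivot ∧ pivot < u := by
        have := (List.mem_filter.mp hpiv).2; simpa using this
      have hrb : ∀ x ∈ rest, l < x ∧ x < u := by
        intro x hx
        have : x ∈ pts.filter (fun p => decide (l < p) && decide (p < u)) := by
          rw [hF]; exact List.mem_cons_of_mem _ hx
        have := (List.mem_filter.mp this).2; simpa using this
      have hrlen : rest.length ≤ n := by
        have h1 := List.length_filter_le (fun p => decide (l < p) && decide (p < u)) pts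
        rw [hF] at h1; simp at h1; omega
      rw [ih rest l pivot lc false hrlen hpb.1, ih rest pivot u false uc hrlen hpb.2]
      rw [← nsort_split l u pivot rest hrb hpb.1 hpb.2, chain_append]

-- A's boundary-adjustment foldl, characterized (non-degenerate interval)
theorem foldl_boundary (l u : Int) (hlu : l ≠ u) :
    ∀ (pts : List Int) (acc : List Int) (lc uc : Bool),
      pts.foldl (pvBoundaryStep l u) (acc, lc, uc)
        = (acc ++ pts.filter (fun p => decide (l < p) && decide (p < u)),
           lc && !(pts.contains l), uc && !(pts.contains u)) := by
  intro pts
  induction pts with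
  | nil => intro acc lc uc; simp
  | cons p rest ih =>
    intro acc lc uc
    rw [List.foldl_cons]
    by_cases h1 : l < p ∧ p < u
    · rw [show pvBoundaryStep l u (acc, lc, uc) p = (acc ++ [p], lc, uc) from by
        simp [pvBoundaryStep, h1]]
      rw [ih]
      have hcl : ¬ l = p := by omega
      have hcu : ¬ u = p := by omega
      have hft : (decide (l < p) && decide (p < u)) = true := by simp [h1]
      simp [List.filter_cons, List.contains_cons, hcl, hcu, hft, List.append_assoc]
    · have hff : (decide (l < p) && decide (p < u)) = false := by
        simp only [Bool.and_eq_false_iff, decide_eq_false_iff_not]; omega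
      by_cases h2 : p = l ∧ lc = true
      · rw [show pvBoundaryStep l u (acc, lc, uc) p = (acc, false, uc) from by
          simp [pvBoundaryStep, h1, h2]]
        rw [ih]
        have hcu : ¬ u = p := by have := h2.1; omega
        have hne : ¬ u = l := fun h => hlu h.symm
        simp [List.filter_cons, List.contains_cons, h2.1, h2.2, hcu, hff, hne]
      · by_cases h3 : p = u ∧ uc = true
        · have hne : ¬ u = l := fun h => hlu h.symm
          rw [show pvBoundaryStep l u (acc, lc, uc) p = (acc, lc, false) from by
            simp [pvBoundaryStep, h1, h2, h3, hne]]
          rw [ih]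
          have hcl : ¬ l = p := by have := h3.1; omega
          simp [List.filter_cons, List.contains_cons, h3.1, h3.2, hcl, hff, hne, hlu]
        · rw [show pvBoundaryStep l u (acc, lc, uc) p = (acc, lc, uc) from by
            simp [pvBoundaryStep, h1, h2, h3]]
          rw [ih]
          simp only [List.filter_cons, hff, Bool.false_eq_true, if_false, List.contains_cons]
          refine Prod.ext rfl (Prod.ext ?_ ?_) <;> simp only []
          · by_cases hpl : p = l
            · have hlc : lc = false := by
                cases lc
                · rfl
                · exact absurd ⟨hpl, rfl⟩ h2
              simp [hlc]
            · have hne : ¬ l = p := fun h => hpl h.symm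
              have hb : (l == p) = false := by simp [hne]
              simp [hb]
          · by_cases hpu : p = u
            · have huc : uc = false := by
                cases uc
                · rfl
                · exact absurd ⟨hpu, rfl⟩ h3
              simp [huc]
            · have hne : ¬ u = p := fun h => hpu h.symm
              have hb : (u == p) = false := by simp [hne]
              simp [hb]

-- degenerate interval l = u: the collected interior list stays empty
theorem foldl_deg_fst (l : Int) :
    ∀ (pts : List Int) (st : List Int × Bool × Bool),
      (pts.foldl (pvBoundaryStep l l) st).1 = st.1 := by
  intro pts
  induction pts with
  | nil => intro st; rfl
  | cons p rest ih =>
    intro st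
    rw [List.foldl_cons, ih]
    unfold pvBoundaryStep
    split_ifs with a b c
    · omega
    · rfl
    · rfl
    · rfl

-- degenerate interval l = u: the conjunction of the two closedness flags
theorem foldl_deg_and (l : Int) :
    ∀ (pts : List Int) (st : List Int × Bool × Bool),
      ((pts.foldl (pvBoundaryStep l l) st).2.1 && (pts.foldl (pvBoundaryStep l l) st).2.2)
        = (st.2.1 && st.2.2 && !(pts.contains l)) := by
  intro pts
  induction pts with
  | nil => intro st; simp
  | cons p rest ih =>
    intro st
    rw [List.foldl_cons, ih]
    by_cases hpl : p = l
    · subst hpl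
      have hstep : ((pvBoundaryStep p p st p).2.1 && (pvBoundaryStep p p st p).2.2) = false := by
        unfold pvBoundaryStep
        split_ifs with a b c
        · omega
        · simp
        · simp
        · have h1 : st.2.1 = false := by
            cases h : st.2.1
            · rfl
            · exact absurd ⟨rfl, h⟩ b
          simp [h1]
      rw [hstep]
      simp [List.contains_cons]
    · have hstep : pvBoundaryStep l l st p = st := by
        unfold pvBoundaryStep
        split_ifs with a b c
        · omega
        · exact absurd b.1 hpl
        · exact absurd c.1 hpl
        · rfl
      rw [hstep]
      have hne : ¬ l = p := fun h => hpl h.symm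
      simp [List.contains_cons, hne]

theorem split_region_around_points_spec : Claim_equal_split_region_around_points := by
  intro region pts _
  unfold Spec_split_region_around_points
  obtain ⟨l, u, lc0, uc0⟩ := region
  by_cases hpts : pts = []
  · subst hpts
    simp [split_region_around_points, split_region_around_points_alt]
  · simp only [split_region_around_points, split_region_around_points_alt, if_neg hpts]
    by_cases hlu : l = u
    · subst hlu
      rw [foldl_deg_fst]
      have hany : (pts.any fun p => decide (l < p) && decide (p < l)) = false := by
        apply List.any_eq_false.mpr
        intro p _
        by_cases hp : l < p
        · have h1 : decide (p < l) = false := decide_eq_false (by omega)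
          simp [h1]
        · have h1 : decide (l < p) = false := decide_eq_false hp
          simp [h1]
      rw [hany]
      rw [if_pos (show (([] : List Int), lc0, uc0).1 = [] from rfl)]
      rw [if_pos (show ¬ (false = true) from Bool.false_ne_true)]
      have h2 := foldl_deg_and l pts ([], lc0, uc0)
      have hsplit : ((lc0 && !pts.contains l) = true ∧ (uc0 && !pts.contains l) = true) ↔
          (lc0 && uc0 && !pts.contains l) = true := by
        cases lc0 <;> cases uc0 <;> cases pts.contains l <;> simp
      by_cases hT : ((pts.foldl (pvBoundaryStep l l) ([], lc0, uc0)).2.1 &&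
          (pts.foldl (pvBoundaryStep l l) ([], lc0, uc0)).2.2) = true
      · obtain ⟨ha, hb⟩ := Bool.and_eq_true_iff.mp hT
        have hcj : (lc0 && uc0 && !pts.contains l) = true := by
          rw [← h2]; exact hT
        obtain ⟨hl', hu'⟩ := hsplit.mpr hcj
        rw [if_pos (Or.inr ⟨rfl, ha, hb⟩), if_pos (Or.inr ⟨rfl, hl', hu'⟩)]
        rw [ha, hb, hl', hu']
      · have hnA : ¬ (l < l ∨ l = l ∧
            (pts.foldl (pvBoundaryStep l l) ([], lc0, uc0)).2.1 = true ∧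
            (pts.foldl (pvBoundaryStep l l) ([], lc0, uc0)).2.2 = true) := by
          rintro (h | ⟨-, ha, hb⟩)
          · omega
          · exact hT (by simp [ha, hb])
        have hnB : ¬ (l < l ∨ l = l ∧
            (lc0 && !pts.contains l) = true ∧ (uc0 && !pts.contains l) = true) := by
          rintro (h | ⟨-, hl', hu'⟩)
          · omega
          · exact hT (by rw [h2]; exact hsplit.mp ⟨hl', hu'⟩)
        rw [if_neg hnA, if_neg hnB]
    · rw [foldl_boundary l u hlu pts [] lc0 uc0]
      simp only [List.nil_append]
      cases hF : pts.filter (fun p => decide (l < p) && decide (p < u)) with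
      | nil =>
        have hany : (pts.any fun p => decide (l < p) && decide (p < u)) = false := by
          apply List.any_eq_false.mpr
          intro x hx
          intro hc
          have : x ∈ pts.filter (fun p => decide (l < p) && decide (p < u)) :=
            List.mem_filter.mpr ⟨hx, hc⟩
          rw [hF] at this
          simp at this
        rw [hany]
        rw [if_pos (show ([] : List Int) = [] from rfl)]
        rw [if_pos (show ¬ (false = true) from Bool.false_ne_true)]
      | cons pivot rest' =>
        have hpiv : pivot ∈ pts.filter (fun p => decide (l < p) && decide (p < u)) := by
          rw [hF]; exact List.mem_cons_self ..
        have hpb : l < pivot ∧ pivot < u := by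
          have := (List.mem_filter.mp hpiv).2; simpa using this
        have hlt : l < u := by omega
        have hany : (pts.any fun p => decide (l < p) && decide (p < u)) = true :=
          List.any_eq_true.mpr ⟨pivot, (List.mem_filter.mp hpiv).1, (List.mem_filter.mp hpiv).2⟩
        rw [hany]
        rw [if_neg (show ¬ (pivot :: rest' = ([] : List Int)) from by simp)]
        rw [if_neg (show ¬ ¬ (true = true) from by simp)]
        rw [bCarve_char pts.length pts l u (lc0 && !pts.contains l) (uc0 && !pts.contains u) le_rfl hlt]
        rw [hF]
        have hsp : (PySem.List.sorted (pivot :: rest') (fun x => x) false).Pairwise (· ≤ ·) :=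
          sorted_pairwise_le _
        have hmemb : ∀ p ∈ PySem.List.sorted (pivot :: rest') (fun x => x) false,
            l < p ∧ p < u := by
          intro p hp
          rw [PySem.List.mem_sorted] at hp
          have : p ∈ pts.filter (fun q => decide (l < q) && decide (q < u)) := by rw [hF]; exact hp
          have := (List.mem_filter.mp this).2
          simpa using this
        rw [A_loop u (uc0 && !pts.contains u) (PySem.List.sorted (pivot :: rest') (fun x => x) false)
          l (lc0 && !pts.contains l) hlt hsp
          (fun p hp => ⟨le_of_lt (hmemb p hp).1, (hmemb p hp).2⟩)
          (fun _ p hp => (hmemb p hp).1)]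
        -- dAdj l (sorted (pivot :: rest')) = nsort (pivot :: rest')
        have hdn : dAdj l (PySem.List.sorted (pivot :: rest') (fun x => x) false)
            = nsort (pivot :: rest') := by
          unfold nsort
          cases heq : PySem.List.sorted (pivot :: rest') (fun x => x) false with
          | nil =>
            have := PySem.List.sorted_eq_nil_iff
              (xs := pivot :: rest') (key := fun x => x) (rev := false)
            exact absurd (this.mp heq) (by simp)
          | cons a r =>
            have ha : a ∈ PySem.List.sorted (pivot :: rest') (fun x => x) false := by
              rw [heq]; exact List.mem_cons_self ..
            have hla : l < a := (hmemb a ha).1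
            simp [dAdj, show ¬ a = l from by omega]
        rw [hdn]
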